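-- pv_equiv track=rewrite | github.com/WatermeloneXT/IO-Benchmark | build_steps/step3_transform.py | row_matches_problem
-- ===== SOURCE A (Python) =====
-- from typing import Any, Dict, List, Optional, Set, Tuple
--
-- def row_matches_problem(row: Dict[str, Any], filters: List[str]) -> bool:
--     if not filters:
--         return True
--     problem_number = str(row.get("problem_number", "")).strip()
--     base_id = str(row.get("id", "")).strip()
--     for f in filters:
--         if problem_number == f:
--             return True
--         if base_id == f:
--             return True
--         if base_id.startswith(f + "/"):
--             return True
--     return False
-- ===== SOURCE B (Python) =====
-- def row_matches_problem(row, filters):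
--     if not filters:
--         return True
--     fset = set(filters)
--     problem_number = str(row.get("problem_number", "")).strip()
--     base_id = str(row.get("id", "")).strip()
--     if problem_number in fset or base_id in fset:
--         return True
--     prefixes = {base_id[:i] for i, ch in enumerate(base_id) if ch == '/'}
--     return not prefixes.isdisjoint(fset)
-- ===== Notes on version B (the rewrite author's own statement) =====
-- stated objective: idiomatic
-- what changed: Replaces the linear scan over filters (exact match + startswith per filter) by a filter set queried once, with the prefix test inverted: B enumerates the slash positions of base_id and intersects the resulting boundary-prefix set with the filter set.
import Mathlib
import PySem

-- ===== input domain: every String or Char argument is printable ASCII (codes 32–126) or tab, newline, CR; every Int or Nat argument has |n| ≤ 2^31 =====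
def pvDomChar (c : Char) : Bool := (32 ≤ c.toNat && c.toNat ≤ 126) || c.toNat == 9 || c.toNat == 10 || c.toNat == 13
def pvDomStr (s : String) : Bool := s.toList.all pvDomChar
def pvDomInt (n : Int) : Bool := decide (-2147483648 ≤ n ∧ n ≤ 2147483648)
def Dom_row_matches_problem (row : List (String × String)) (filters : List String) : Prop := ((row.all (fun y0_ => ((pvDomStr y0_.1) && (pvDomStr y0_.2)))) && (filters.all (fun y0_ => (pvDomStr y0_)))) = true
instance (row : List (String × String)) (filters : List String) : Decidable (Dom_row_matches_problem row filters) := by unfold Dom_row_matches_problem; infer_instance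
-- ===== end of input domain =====

-- B replaces A's per-filter scan (exact match + startswith for each filter) by one set of
-- filters intersected with the set of slash-boundary prefixes of base_id (idiomatic set version).

-- ===== PORT A =====
-- the 'for f in filters' loop with its early returns
def pvLoopA (problem_number base_id : String) : List String → Bool
  | [] => false
  | f :: fs =>
    if problem_number == f then true
    else if base_id == f then true
    else if PySem.Str.startswith base_id (f ++ "/") then true
    else pvLoopA problem_number base_id fs

def row_matches_problem (row : List (String × String)) (filters : List String) : Bool :=
  if filters.isEmpty then true
  else
    let problem_number := PySem.Str.strip (PySem.Dict.getD (PySem.Dict.mk row) "problem_number" "")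
    let base_id := PySem.Str.strip (PySem.Dict.getD (PySem.Dict.mk row) "id" "")
    pvLoopA problem_number base_id filters

-- ===== PORT B =====
-- {base_id[:i] for i, ch in enumerate(base_id) if ch == '/'}
def pvSlashPrefixes (base_id : String) : PySem.Set String :=
  PySem.Set.ofList
    (((PySem.List.enumerate base_id.toList).filter (fun p => p.2 == '/')).map
      (fun p => PySem.Str.slice base_id none (some p.1)))

def row_matches_problem_alt (row : List (String × String)) (filters : List String) : Bool :=
  if filters.isEmpty then true
  else
    let fset := PySem.Set.ofList filters
    let problem_number := PySem.Str.strip (PySem.Dict.getD (PySem.Dict.mk row) "problem_number" "")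
    let base_id := PySem.Str.strip (PySem.Dict.getD (PySem.Dict.mk row) "id" "")
    if PySem.Set.contains fset problem_number || PySem.Set.contains fset base_id then true
    else !(PySem.Set.isdisjoint (pvSlashPrefixes base_id) fset)

-- ===== PRECONDITION & SPEC =====
def Spec_row_matches_problem (row : List (String × String)) (filters : List String) (out : Bool) : Prop := out = row_matches_problem_alt row filters
instance (row : List (String × String)) (filters : List String) (out : Bool) : Decidable (Spec_row_matches_problem row filters out) := by unfold Spec_row_matches_problem; infer_instance

-- ===== CLAIM (what is proved, stated in full; the proofs are below) =====
def Claim_equal_row_matches_problem : Prop := ∀ (row : List (String × String)) (filters : List String), Dom_row_matches_problem row filters → Spec_row_matches_problem row filters (row_matches_problem row filters)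

-- ===== LEMMAS AND PROOFS =====

-- A's loop returns true iff some filter matches one of the three tests
theorem pvLoopA_eq_true_iff (pn base : String) (fs : List String) :
    pvLoopA pn base fs = true ↔
      ∃ f ∈ fs, pn = f ∨ base = f ∨ PySem.Str.startswith base (f ++ "/") = true := by
  induction fs with
  | nil => simp [pvLoopA]
  | cons f fs ih =>
    simp only [pvLoopA]
    split_ifs with h1 h2 h3
    · simp_all
    · simp_all
    · simp_all
    · simp only [ih, List.mem_cons]
      constructor
      · rintro ⟨g, hg, h⟩; exact ⟨g, Or.inr hg, h⟩
      · rintro ⟨g, hg | hg, h⟩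
        · subst hg
          rcases h with h | h | h
          · exact absurd (by simp [h]) h1
          · exact absurd (by simp [h]) h2
          · exact absurd h h3
        · exact ⟨g, hg, h⟩

-- list-level characterisation of 'l has prefix q ++ ['/']'
theorem prefix_slash_iff (q l : List Char) :
    q ++ ['/'] <+: l ↔ ∃ k, ∃ _ : k < l.length, l[k] = '/' ∧ q = l.take k := by
  constructor
  · rintro ⟨t, ht⟩
    rw [List.append_assoc] at ht
    subst ht
    have hk : q.length < (q ++ ('/' :: t)).length := by simp
    refine ⟨q.length, hk, ?_, ?_⟩
    · rw [List.getElem_append_right (Nat.le_refl _)]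
      simp
    · simp
  · rintro ⟨k, hk, hc, hq⟩
    subst hq
    refine ⟨l.drop (k + 1), ?_⟩
    have h1 : l.take k ++ ['/'] = l.take (k + 1) := by
      rw [List.take_succ]
      simp [List.getElem?_eq_getElem hk, hc]
    rw [h1, List.take_append_drop]

-- membership in B's boundary-prefix set
theorem mem_pvSlashPrefixes (base p : String) :
    p ∈ pvSlashPrefixes base ↔
      ∃ k, ∃ _ : k < base.toList.length, base.toList[k] = '/' ∧ p.toList = base.toList.take k := by
  unfold pvSlashPrefixes
  rw [PySem.Set.mem_ofList]
  simp only [List.mem_map, List.mem_filter, PySem.List.mem_enumerate_iff]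
  constructor
  · rintro ⟨⟨i, c⟩, ⟨⟨k, hk, hik⟩, hc⟩, hp⟩
    obtain ⟨hi, hcc⟩ := Prod.mk.injEq .. ▸ hik
    refine ⟨k, hk, ?_, ?_⟩
    · rw [← hcc]; simpa using hc
    · rw [← hp]
      have hs : (PySem.Str.slice base none (some ((k : Int)))).toList
          = base.toList.take k := by
        rw [PySem.Str.toList_slice]
        exact PySem.List.slice_to_natCast base.toList k
      simp only [hi]
      simpa using hs
  · rintro ⟨k, hk, hc, hp⟩
    refine ⟨((0 : Int) + (k : Int), base.toList[k]), ⟨⟨k, hk, rfl⟩, by simp [hc]⟩, ?_⟩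
    apply String.toList_inj.mp
    rw [PySem.Str.toList_slice]
    have : PySem.Chars.slice base.toList none (some ((0 : Int) + (k : Int)))
        = base.toList.take k := by
      simpa using PySem.List.slice_to_natCast base.toList k
    rw [this, hp]

-- startswith over strings, reduced to the list characterisation
theorem startswith_slash_iff (base f : String) :
    PySem.Str.startswith base (f ++ "/") = true ↔
      ∃ k, ∃ _ : k < base.toList.length, base.toList[k] = '/' ∧ f.toList = base.toList.take k := by
  rw [PySem.Str.startswith_eq, PySem.Chars.startswith_iff]
  have h : (f ++ "/").toList = f.toList ++ ['/'] := by simp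
  rw [h, prefix_slash_iff]

-- B's intersection test, characterised
theorem not_isdisjoint_iff (base : String) (filters : List String) :
    (!(PySem.Set.isdisjoint (pvSlashPrefixes base) (PySem.Set.ofList filters))) = true ↔
      ∃ p ∈ pvSlashPrefixes base, p ∈ filters := by
  rw [Bool.not_eq_eq_eq_not, Bool.not_true, ← Bool.not_eq_true, PySem.Set.isdisjoint_iff]
  push_neg
  simp only [PySem.Set.mem_ofList]

-- ===== VERDICT (by name: the statement is the Claim_ definition above) =====
theorem row_matches_problem_spec : Claim_equal_row_matches_problem := by
  intro row filters _
  unfold Spec_row_matches_problem row_matches_problem row_matches_problem_alt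
  by_cases he : filters.isEmpty
  · simp [he]
  · simp only [he, Bool.false_eq_true, if_false]
    set pn := PySem.Str.strip (PySem.Dict.getD (PySem.Dict.mk row) "problem_number" "") with hpn
    set base := PySem.Str.strip (PySem.Dict.getD (PySem.Dict.mk row) "id" "") with hbase
    by_cases h1 : PySem.Set.contains (PySem.Set.ofList filters) pn = true
    · rw [h1]
      simp only [Bool.true_or, if_true]
      rw [pvLoopA_eq_true_iff]
      rw [PySem.Set.contains_iff _ _, PySem.Set.mem_ofList] at h1
      exact ⟨pn, h1, Or.inl rfl⟩
    · by_cases h2 : PySem.Set.contains (PySem.Set.ofList filters) base = true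
      · rw [h2]
        simp only [Bool.or_true, if_true]
        rw [pvLoopA_eq_true_iff]
        rw [PySem.Set.contains_iff _ _, PySem.Set.mem_ofList] at h2
        exact ⟨base, h2, Or.inr (Or.inl rfl)⟩
      · rw [Bool.eq_false_iff.mpr h1, Bool.eq_false_iff.mpr h2]
        simp only [Bool.or_false, Bool.false_eq_true, if_false]
        have h1' : pn ∉ filters := fun hm =>
          h1 ((PySem.Set.contains_iff _ _).mpr ((PySem.Set.mem_ofList ..).mpr hm))
        have h2' : base ∉ filters := fun hm =>
          h2 ((PySem.Set.contains_iff _ _).mpr ((PySem.Set.mem_ofList ..).mpr hm))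
        rw [Bool.eq_iff_iff, pvLoopA_eq_true_iff, not_isdisjoint_iff]
        constructor
        · rintro ⟨f, hf, hcase⟩
          rcases hcase with rfl | rfl | hs
          · exact absurd hf h1'
          · exact absurd hf h2'
          · obtain ⟨k, hk, hc, hp⟩ := (startswith_slash_iff base f).mp hs
            exact ⟨f, (mem_pvSlashPrefixes base f).mpr ⟨k, hk, hc, hp⟩, hf⟩
        · rintro ⟨p, hpmem, hpf⟩
          obtain ⟨k, hk, hc, hp⟩ := (mem_pvSlashPrefixes base p).mp hpmem
          exact ⟨p, hpf, Or.inr (Or.inr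
            ((startswith_slash_iff base p).mpr ⟨k, hk, hc, hp⟩))⟩
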